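-- pv_equiv track=rewrite | github.com/carderne/hashcode | pizza.py | get_locs
-- ===== SOURCE A (Python) =====
-- def get_locs(r1, c1, r2, c2):
--     """Get ndarray locations of given bounds."""
--     rs = []
--     cs = []
--     for r in range(r1, r2 + 1):
--         for c in range(c1, c2 + 1):
--             rs.append(r)
--             cs.append(c)
--
--     return rs, cs
-- ===== SOURCE B (Python) =====
-- def get_locs(r1, c1, r2, c2):
--     """Get ndarray locations of given bounds."""
--     rows = list(range(r1, r2 + 1))
--     if not rows:
--         return [], []
--     cols = list(range(c1, c2 + 1))
--     cs = cols * len(rows)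
--     rs = [r for r in rows for _ in cols]
--     return rs, cs
-- ===== Notes on version B (the rewrite author's own statement) =====
-- stated objective: simpler
-- what changed: Replaces the interleaved nested append loop by two separate constructions: cs is the column range tiled nrows times, rs is each row value repeated ncols times in a block.
import Mathlib
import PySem

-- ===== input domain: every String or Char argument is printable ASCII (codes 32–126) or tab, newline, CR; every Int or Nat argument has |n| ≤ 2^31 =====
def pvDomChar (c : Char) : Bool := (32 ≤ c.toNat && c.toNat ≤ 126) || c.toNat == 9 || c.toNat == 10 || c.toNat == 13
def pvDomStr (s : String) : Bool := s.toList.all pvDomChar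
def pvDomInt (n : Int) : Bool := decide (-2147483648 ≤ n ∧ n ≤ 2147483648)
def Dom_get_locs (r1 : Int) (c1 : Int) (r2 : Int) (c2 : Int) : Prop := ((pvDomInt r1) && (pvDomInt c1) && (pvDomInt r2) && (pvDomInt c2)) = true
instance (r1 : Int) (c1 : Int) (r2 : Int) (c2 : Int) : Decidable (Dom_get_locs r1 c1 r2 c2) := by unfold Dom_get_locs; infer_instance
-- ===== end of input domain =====

-- ===== PORT A =====
def get_locs (r1 : Int) (c1 : Int) (r2 : Int) (c2 : Int) : List Int × List Int :=
  -- rs = []; cs = []; for r in range(r1, r2+1): for c in range(c1, c2+1): rs.append(r); cs.append(c)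
  -- (appends kept as cons onto reversed accumulators, un-reversed at the end — the usual
  --  linear-time transcription of Python's O(1) list.append)
  let st :=
    (PySem.List.pyRange r1 (r2 + 1) 1).foldl
      (fun st r =>
        (PySem.List.pyRange c1 (c2 + 1) 1).foldl
          (fun st2 c => (r :: st2.1, c :: st2.2)) st)
      ([], [])
  (st.1.reverse, st.2.reverse)

-- ===== PORT B =====
def get_locs_alt (r1 : Int) (c1 : Int) (r2 : Int) (c2 : Int) : List Int × List Int :=
  -- rows = list(range(r1, r2+1)); if not rows: return [], []
  let rows := PySem.List.pyRange r1 (r2 + 1) 1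
  if rows = [] then ([], [])
  else
    -- cols = list(range(c1, c2+1))
    let cols := PySem.List.pyRange c1 (c2 + 1) 1
    -- cs = cols * len(rows)
    let cs := (List.replicate rows.length cols).flatten
    -- rs = [r for r in rows for _ in cols]
    let rs := rows.flatMap (fun r => cols.map (fun _ => r))
    (rs, cs)

-- ===== PRECONDITION & SPEC =====
def Spec_get_locs (r1 : Int) (c1 : Int) (r2 : Int) (c2 : Int) (out : List Int × List Int) : Prop := out = get_locs_alt r1 c1 r2 c2
instance (r1 : Int) (c1 : Int) (r2 : Int) (c2 : Int) (out : List Int × List Int) : Decidable (Spec_get_locs r1 c1 r2 c2 out) := by unfold Spec_get_locs; infer_instance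

-- ===== CLAIM (what is proved, stated in full; the proofs are below) =====
def Claim_equal_get_locs : Prop := ∀ (r1 : Int) (c1 : Int) (r2 : Int) (c2 : Int), Dom_get_locs r1 c1 r2 c2 → Spec_get_locs r1 c1 r2 c2 (get_locs r1 c1 r2 c2)

-- ===== LEMMAS AND PROOFS =====
-- inner loop: consing each column c onto the reversed cs and r onto the reversed rs
theorem pvInner (r : Int) (cols a b : List Int) :
    cols.foldl (fun st2 c => (r :: st2.1, c :: st2.2)) (a, b)
      = ((cols.map (fun _ => r)).reverse ++ a, cols.reverse ++ b) := by
  induction cols generalizing a b with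
  | nil => simp
  | cons x xs ih => simp [List.foldl, ih]

-- outer loop invariant over any row list
theorem pvOuter (cols rows a b : List Int) :
    rows.foldl
        (fun st r => cols.foldl (fun st2 c => (r :: st2.1, c :: st2.2)) st)
        (a, b)
      = ((rows.flatMap (fun r => cols.map (fun _ => r))).reverse ++ a,
         ((List.replicate rows.length cols).flatten).reverse ++ b) := by
  induction rows generalizing a b with
  | nil => simp
  | cons x xs ih =>
    simp [List.foldl, pvInner, ih, List.replicate_succ, List.reverse_append]

-- ===== VERDICT (by name: the statement is the Claim_ definition above) =====
theorem get_locs_spec : Claim_equal_get_locs := by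
  intro r1 c1 r2 c2 _
  show get_locs r1 c1 r2 c2 = get_locs_alt r1 c1 r2 c2
  simp only [get_locs, get_locs_alt, pvOuter, List.append_nil, List.reverse_reverse]
  split_ifs with h
  · simp [h]
  · rfl
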